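-- pv_equiv track=rewrite | github.com/rcarlsson/adventofcode | 2017/09/aoc_09a.py | solve
-- ===== SOURCE A (Python) =====
-- def solve(data_stream):
--     garbage = False
--     negate = False
--     value = 0
--     result = 0
--     for idx in range(len(data_stream)):
--         char = data_stream[idx]
--
--         if negate:
--             negate = False
--         elif char == "!":
--             negate = True
--         elif char == "<":
--             garbage = True
--         elif char == ">":
--             garbage = False
--         elif not garbage and char == "{":
--             value += 1
--         elif not garbage and char == "}":
--             result += value
--             value -= 1
--     return result
-- ===== SOURCE B (Python) =====
-- def solve(data_stream):
--     # pass 1: drop escape pairs (a lone trailing escape char is dropped too; it scores nothing anyway)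
--     no_esc = []
--     i = 0
--     n = len(data_stream)
--     while i < n:
--         if data_stream[i] == '!':
--             i += 2
--         else:
--             no_esc.append(data_stream[i])
--             i += 1
--     # pass 2: drop garbage spans (unterminated garbage runs to the end)
--     clean = []
--     i = 0
--     m = len(no_esc)
--     while i < m:
--         if no_esc[i] == '<':
--             i += 1
--             while i < m and no_esc[i] != '>':
--                 i += 1
--             i += 1
--         else:
--             clean.append(no_esc[i])
--             i += 1
--     # pass 3: score the braces
--     depth = 0
--     result = 0
--     for c in clean:
--         if c == '{':
--             depth += 1
--         elif c == '}':
--             result += depth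
--             depth -= 1
--     return result
-- ===== Notes on version B (the rewrite author's own statement) =====
-- stated objective: alternative
-- what changed: Replaces A's single fused flag-driven state machine (negate and garbage flags carried through one loop) by three independent passes: first strip escaped character pairs, then strip garbage spans, then a plain depth-counting scan over the cleaned characters.
import Mathlib
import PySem

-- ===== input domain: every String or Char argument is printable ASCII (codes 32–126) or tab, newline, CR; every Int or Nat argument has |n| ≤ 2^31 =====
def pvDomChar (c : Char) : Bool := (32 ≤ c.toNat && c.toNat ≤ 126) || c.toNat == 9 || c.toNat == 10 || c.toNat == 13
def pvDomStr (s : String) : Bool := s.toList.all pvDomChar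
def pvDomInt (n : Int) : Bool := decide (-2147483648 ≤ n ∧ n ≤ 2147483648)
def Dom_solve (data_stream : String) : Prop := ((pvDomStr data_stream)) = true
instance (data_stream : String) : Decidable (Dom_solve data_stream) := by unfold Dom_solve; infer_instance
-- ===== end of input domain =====

-- B replaces the fused escape/garbage/score state machine by three separate cleaning passes (alternative decomposition, same cost).

-- ===== PORT A =====
-- loop of A over indices 0..len-1, state (garbage, negate, value, result)
def aLoop : List Char → Bool → Bool → Int → Int → Int
  | [], _, _, _, result => result
  | c :: rest, garbage, negate, value, result =>
    if negate then aLoop rest garbage false value result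
    else if c = '!' then aLoop rest garbage true value result
    else if c = '<' then aLoop rest true negate value result
    else if c = '>' then aLoop rest false negate value result
    else if !garbage && c = '{' then aLoop rest garbage negate (value + 1) result
    else if !garbage && c = '}' then aLoop rest garbage negate (value - 1) (result + value)
    else aLoop rest garbage negate value result

def solve (data_stream : String) : Int := aLoop data_stream.toList false false 0 0

-- ===== PORT B =====
-- pass 1 of B: drop escape pairs (a lone trailing escape char is dropped too)
def stripEsc : List Char → List Char
  | [] => []
  | [c] => if c = '!' then [] else [c]
  | c :: d :: rest => if c = '!' then stripEsc rest else c :: stripEsc (d :: rest)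

-- pass 2 of B: drop garbage spans; skipGarbage consumes up to and including the closer
mutual
def stripGarbage : List Char → List Char
  | [] => []
  | c :: t => if c = '<' then skipGarbage t else c :: stripGarbage t
def skipGarbage : List Char → List Char
  | [] => []
  | c :: t => if c = '>' then stripGarbage t else skipGarbage t
end

-- pass 3 of B: depth-counting scan, state (depth, result)
def bScan : List Char → Int → Int → Int
  | [], _, result => result
  | c :: t, depth, result =>
    if c = '{' then bScan t (depth + 1) result
    else if c = '}' then bScan t (depth - 1) (result + depth)
    else bScan t depth result

def solve_alt (data_stream : String) : Int :=
  bScan (stripGarbage (stripEsc data_stream.toList)) 0 0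

-- ===== PRECONDITION & SPEC =====
def Spec_solve (data_stream : String) (out : Int) : Prop := out = solve_alt data_stream
instance (data_stream : String) (out : Int) : Decidable (Spec_solve data_stream out) := by unfold Spec_solve; infer_instance

-- ===== CLAIM (what is proved, stated in full; the proofs are below) =====
def Claim_equal_solve : Prop := ∀ (data_stream : String), Dom_solve data_stream → Spec_solve data_stream (solve data_stream)

-- ===== LEMMAS AND PROOFS =====

-- proof-only machine: A's loop after escapes are gone (no negate flag)
def mLoop : List Char → Bool → Int → Int → Int
  | [], _, _, result => result
  | c :: t, garbage, value, result =>
    if c = '<' then mLoop t true value result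
    else if c = '>' then mLoop t false value result
    else if !garbage && c = '{' then mLoop t garbage (value + 1) result
    else if !garbage && c = '}' then mLoop t garbage (value - 1) (result + value)
    else mLoop t garbage value result

theorem aLoop_cons (c : Char) (t : List Char) (g : Bool) (v r : Int) (h : c ≠ '!') :
    aLoop (c :: t) g false v r =
      if c = '<' then aLoop t true false v r
      else if c = '>' then aLoop t false false v r
      else if !g && c = '{' then aLoop t g false (v + 1) r
      else if !g && c = '}' then aLoop t g false (v - 1) (r + v)
      else aLoop t g false v r := by
  conv_lhs => rw [aLoop]
  simp [h]

theorem mLoop_cons (c : Char) (t : List Char) (g : Bool) (v r : Int) :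
    mLoop (c :: t) g v r =
      if c = '<' then mLoop t true v r
      else if c = '>' then mLoop t false v r
      else if !g && c = '{' then mLoop t g (v + 1) r
      else if !g && c = '}' then mLoop t g (v - 1) (r + v)
      else mLoop t g v r := by
  conv_lhs => rw [mLoop]

theorem aLoop_eq_mLoop : ∀ (l : List Char) (g : Bool) (v r : Int),
    aLoop l g false v r = mLoop (stripEsc l) g v r
  | [], g, v, r => by simp [aLoop, mLoop, stripEsc]
  | [c], g, v, r => by
    by_cases h : c = '!'
    · simp [aLoop, mLoop, stripEsc, h]
    · rw [stripEsc, if_neg h, aLoop_cons c [] g v r h, mLoop_cons c [] g v r]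
      split_ifs <;> simp [aLoop, mLoop]
  | c :: d :: rest, g, v, r => by
    by_cases h : c = '!'
    · have : aLoop (c :: d :: rest) g false v r = aLoop rest g false v r := by
        simp [aLoop, h]
      rw [this, stripEsc, if_pos h]
      exact aLoop_eq_mLoop rest g v r
    · rw [stripEsc, if_neg h, aLoop_cons c (d :: rest) g v r h,
        mLoop_cons c (stripEsc (d :: rest)) g v r]
      split_ifs <;> exact aLoop_eq_mLoop (d :: rest) _ _ _

theorem mLoop_eq_bScan : ∀ (l : List Char) (g : Bool) (v r : Int),
    mLoop l g v r = bScan (if g then skipGarbage l else stripGarbage l) v r := by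
  intro l
  induction l with
  | nil => intro g v r; cases g <;> simp [mLoop, bScan, stripGarbage, skipGarbage]
  | cons c t ih =>
    intro g v r
    by_cases h1 : c = '<'
    · cases g <;> simp only [mLoop, stripGarbage, skipGarbage, if_pos h1, h1] <;>
        rw [ih true v r] <;> simp
    · by_cases h2 : c = '>'
      · cases g <;>
          simp only [mLoop, stripGarbage, skipGarbage, if_neg h1, if_pos h2, h2] <;>
          rw [ih false v r] <;> simp [bScan]
      · cases g
        · simp only [mLoop, stripGarbage, if_neg h1, if_neg h2, Bool.not_false, Bool.true_and,
            if_neg Bool.false_ne_true]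
          split_ifs with h3 h4
          · rw [ih false (v + 1) r]; simp at h3; simp [bScan, h3]
          · rw [ih false (v - 1) (r + v)]; simp at h3 h4; simp [bScan, h3, h4]
          · rw [ih false v r]; simp at h3 h4; simp [bScan, h3, h4]
        · simp only [mLoop, skipGarbage, if_neg h1, if_neg h2, Bool.not_true, Bool.false_and,
            if_neg Bool.false_ne_true, if_pos rfl]
          rw [ih true v r]; simp

-- ===== VERDICT =====
theorem solve_spec : Claim_equal_solve := by
  intro s _
  unfold Spec_solve solve solve_alt
  rw [aLoop_eq_mLoop, mLoop_eq_bScan]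
  simp
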